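-- pv_equiv track=rewrite | github.com/amaru30tupac/hidraulibombas | maintenance/views.py | calculate_general_status_from_post
-- ===== SOURCE A (Python) =====
-- from typing import Dict, List, Tuple
--
-- def calculate_general_status_from_post(post_data: Dict[str, str]) -> str:
--     values = [value for key, value in post_data.items() if "__" in key and value]
--
--     if "F" in values:
--         return "Con fallas"
--     if "P" in values:
--         return "Pendiente"
--     if "D" in values:
--         return "En diagnóstico"
--     if values:
--         return "Revisado"
--     return "Sin clasificar"
-- ===== SOURCE B (Python) =====
-- def calculate_general_status_from_post(post_data):
--     ranks = {"F": 0, "P": 1, "D": 2}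
--     labels = ["Con fallas", "Pendiente", "En diagn\u00f3stico", "Revisado"]
--     best = 4
--     for key, value in post_data.items():
--         if "__" in key and value:
--             r = ranks.get(value, 3)
--             if r < best:
--                 best = r
--     return labels[best] if best < 4 else "Sin clasificar"
-- ===== Notes on version B (the rewrite author's own statement) =====
-- stated objective: alternative
-- what changed: Replaces building an intermediate values list followed by four separate membership scans with a single pass that maintains a running minimum priority rank (F<P<D<other) and maps the final rank to its label.
import Mathlib
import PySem

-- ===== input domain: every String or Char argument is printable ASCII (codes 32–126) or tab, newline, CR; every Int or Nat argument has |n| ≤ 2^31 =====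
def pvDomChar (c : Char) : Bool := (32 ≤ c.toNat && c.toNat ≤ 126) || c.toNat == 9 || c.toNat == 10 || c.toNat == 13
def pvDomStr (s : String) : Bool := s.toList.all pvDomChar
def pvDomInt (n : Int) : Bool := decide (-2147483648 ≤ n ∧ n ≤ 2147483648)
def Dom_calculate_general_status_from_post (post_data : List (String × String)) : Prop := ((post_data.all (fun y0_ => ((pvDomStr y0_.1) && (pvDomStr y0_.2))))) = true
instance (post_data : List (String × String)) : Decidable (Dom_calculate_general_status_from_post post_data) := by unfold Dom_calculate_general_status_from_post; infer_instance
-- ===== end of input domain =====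

-- B replaces A's intermediate values list + four membership scans by a single pass keeping a running minimum priority rank (alternative decomposition, same cost).


-- ===== PORT A =====
-- shared predicate: '"__" in key and value' (truthiness of a str is non-emptiness)
def pvTake (k v : String) : Bool := PySem.Str.isIn "__" k && v ≠ ""

-- values = [value for key, value in post_data.items() if "__" in key and value]
def pvValuesA (post_data : List (String × String)) : List String :=
  (post_data.filter (fun kv => pvTake kv.1 kv.2)).map Prod.snd

def calculate_general_status_from_post (post_data : List (String × String)) : String :=
  let values := pvValuesA post_data
  if "F" ∈ values then "Con fallas"
  else if "P" ∈ values then "Pendiente"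
  else if "D" ∈ values then "En diagnóstico"
  else if values ≠ [] then "Revisado"
  else "Sin clasificar"

-- ===== PORT B =====
-- B's own '"__" in key and value' test
def pvTakeB (k v : String) : Bool := PySem.Str.isIn "__" k && v ≠ ""

-- ranks.get(value, 3)
def pvRankOf (v : String) : Nat :=
  if v = "F" then 0 else if v = "P" then 1 else if v = "D" then 2 else 3

-- the for-loop: running minimum rank `best`
def pvLoopB (l : List (String × String)) (best : Nat) : Nat :=
  match l with
  | [] => best
  | (k, v) :: rest =>
      if pvTakeB k v then
        let r := pvRankOf v
        pvLoopB rest (if r < best then r else best)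
      else pvLoopB rest best

def calculate_general_status_from_post_alt (post_data : List (String × String)) : String :=
  let labels := ["Con fallas", "Pendiente", "En diagnóstico", "Revisado"]
  let best := pvLoopB post_data 4
  if best < 4 then labels.getD best "Sin clasificar" else "Sin clasificar"

-- ===== PRECONDITION & SPEC =====
def Spec_calculate_general_status_from_post (post_data : List (String × String)) (out : String) : Prop := out = calculate_general_status_from_post_alt post_data
instance (post_data : List (String × String)) (out : String) : Decidable (Spec_calculate_general_status_from_post post_data out) := by unfold Spec_calculate_general_status_from_post; infer_instance

-- ===== CLAIM (what is proved, stated in full; the proofs are below) =====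
def Claim_equal_calculate_general_status_from_post : Prop := ∀ (post_data : List (String × String)), Dom_calculate_general_status_from_post post_data → Spec_calculate_general_status_from_post post_data (calculate_general_status_from_post post_data)

-- ===== LEMMAS AND PROOFS =====

-- minimum rank of a list of values
def pvMinRank (vs : List String) : Nat := vs.foldr (fun v m => min (pvRankOf v) m) 4

lemma pvMinRank_cons (v : String) (t : List String) :
    pvMinRank (v :: t) = min (pvRankOf v) (pvMinRank t) := rfl

lemma pvValuesA_cons (k v : String) (rest : List (String × String)) :
    pvValuesA ((k, v) :: rest) = if pvTake k v then v :: pvValuesA rest else pvValuesA rest := by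
  unfold pvValuesA
  rw [List.filter_cons]
  cases pvTake k v
  · simp only [Bool.false_eq_true, if_false]
  · simp only [if_true, List.map_cons]

lemma pvRankOf_le_three (v : String) : pvRankOf v ≤ 3 := by
  unfold pvRankOf; split_ifs <;> omega

lemma pvRankOf_le_zero_iff (v : String) : pvRankOf v ≤ 0 ↔ v = "F" := by
  unfold pvRankOf; split_ifs <;> simp_all

lemma pvRankOf_le_one_iff (v : String) : pvRankOf v ≤ 1 ↔ v = "F" ∨ v = "P" := by
  unfold pvRankOf; split_ifs <;> simp_all

lemma pvRankOf_le_two_iff (v : String) : pvRankOf v ≤ 2 ↔ v = "F" ∨ v = "P" ∨ v = "D" := by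
  unfold pvRankOf; split_ifs <;> simp_all

lemma pvMinRank_le_four (vs : List String) : pvMinRank vs ≤ 4 := by
  cases vs with
  | nil => simp [pvMinRank]
  | cons v t =>
    rw [pvMinRank_cons]
    have := pvRankOf_le_three v
    omega

lemma pvLoopB_eq_min (l : List (String × String)) (b : Nat) (hb : b ≤ 4) :
    pvLoopB l b = min b (pvMinRank (pvValuesA l)) := by
  induction l generalizing b with
  | nil =>
    simp only [pvLoopB, pvValuesA, List.filter_nil, List.map_nil, pvMinRank, List.foldr_nil]
    omega
  | cons kv rest ih =>
    obtain ⟨k, v⟩ := kv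
    rw [pvValuesA_cons]
    cases h : pvTake k v
    · simp only [pvLoopB, pvTakeB.eq_def, ← pvTake.eq_def, h, Bool.false_eq_true, if_false]
      exact ih b hb
    · simp only [pvLoopB, pvTakeB.eq_def, ← pvTake.eq_def, h, if_true]
      have hr := pvRankOf_le_three v
      rw [ih _ (by split_ifs <;> omega), pvMinRank_cons]
      split_ifs <;> omega

lemma pvMinRank_le_zero_iff (vs : List String) : pvMinRank vs ≤ 0 ↔ "F" ∈ vs := by
  induction vs with
  | nil => simp [pvMinRank]
  | cons v t ih =>
    rw [pvMinRank_cons]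
    simp only [min_le_iff, ih, pvRankOf_le_zero_iff, List.mem_cons, eq_comm]

lemma pvMinRank_le_one_iff (vs : List String) : pvMinRank vs ≤ 1 ↔ "F" ∈ vs ∨ "P" ∈ vs := by
  induction vs with
  | nil => simp [pvMinRank]
  | cons v t ih =>
    rw [pvMinRank_cons]
    simp only [min_le_iff, ih, pvRankOf_le_one_iff, List.mem_cons, eq_comm]
    tauto

lemma pvMinRank_le_two_iff (vs : List String) : pvMinRank vs ≤ 2 ↔ "F" ∈ vs ∨ "P" ∈ vs ∨ "D" ∈ vs := by
  induction vs with
  | nil => simp [pvMinRank]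
  | cons v t ih =>
    rw [pvMinRank_cons]
    simp only [min_le_iff, ih, pvRankOf_le_two_iff, List.mem_cons, eq_comm]
    tauto

lemma pvMinRank_le_three_of_ne_nil (vs : List String) (h : vs ≠ []) : pvMinRank vs ≤ 3 := by
  cases vs with
  | nil => simp at h
  | cons v t =>
    rw [pvMinRank_cons]
    have := pvRankOf_le_three v
    omega

-- ===== VERDICT (by name: the statement is the Claim_ definition above) =====
theorem calculate_general_status_from_post_spec : Claim_equal_calculate_general_status_from_post := by
  intro post_data _
  unfold Spec_calculate_general_status_from_post
  unfold calculate_general_status_from_post calculate_general_status_from_post_alt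
  rw [pvLoopB_eq_min post_data 4 (le_refl 4),
      min_eq_right (pvMinRank_le_four (pvValuesA post_data))]
  set vs := pvValuesA post_data with hvs
  by_cases hF : "F" ∈ vs
  · have h0 : pvMinRank vs = 0 := by
      have := (pvMinRank_le_zero_iff vs).mpr hF
      omega
    simp [hF, h0]
  · by_cases hP : "P" ∈ vs
    · have h1 : pvMinRank vs = 1 := by
        have ha := (pvMinRank_le_one_iff vs).mpr (Or.inr hP)
        have hb : ¬ pvMinRank vs ≤ 0 := by rw [pvMinRank_le_zero_iff]; exact hF
        omega
      simp [hF, hP, h1]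
    · by_cases hD : "D" ∈ vs
      · have h2 : pvMinRank vs = 2 := by
          have ha := (pvMinRank_le_two_iff vs).mpr (Or.inr (Or.inr hD))
          have hb : ¬ pvMinRank vs ≤ 1 := by rw [pvMinRank_le_one_iff]; tauto
          omega
        simp [hF, hP, hD, h2]
      · by_cases hne : vs = []
        · simp [hne, pvMinRank]
        · have h3 : pvMinRank vs = 3 := by
            have ha := pvMinRank_le_three_of_ne_nil vs hne
            have hb : ¬ pvMinRank vs ≤ 2 := by rw [pvMinRank_le_two_iff]; tauto
            omega
          simp [hF, hP, hD, hne, h3]
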